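-- pv_equiv track=rewrite | github.com/nakul3000/desktop-agent-agi | company_research_agent.py | _extract_best_job_url
-- ===== SOURCE A (Python) =====
-- from typing import Any, Dict, Iterable, List, Optional, Tuple
--
-- _NA = "NA"
--
-- def _extract_best_job_url(sources: List[Dict[str, Any]]) -> str:
--     # Prefer a URL that looks like an ATS / job posting.
--     for s in sources or []:
--         url = (s.get("url") or "").strip()
--         if not url:
--             continue
--         u = url.lower()
--         if any(
--             token in u
--             for token in (
--                 "workdayjobs.com",
--                 "/job/",
--                 "/jobs/",
--                 "greenhouse.io",
--                 "lever.co",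
--                 "myworkdayjobs.com",
--                 "icims.com",
--                 "smartrecruiters.com",
--             )
--         ):
--             return url
--     # Fallback: first URL.
--     for s in sources or []:
--         url = (s.get("url") or "").strip()
--         if url:
--             return url
--     return _NA
-- ===== SOURCE B (Python) =====
-- _NA = "NA"
--
-- _TOKENS = (
--     "workdayjobs.com",
--     "/job/",
--     "/jobs/",
--     "greenhouse.io",
--     "lever.co",
--     "myworkdayjobs.com",
--     "icims.com",
--     "smartrecruiters.com",
-- )
--
--
-- def _extract_best_job_url(sources):
--     # Single pass: return the first preferred URL immediately, remembering the
--     # first non-empty URL as a fallback along the way.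
--     fallback = None
--     for s in sources or []:
--         url = (s.get("url") or "").strip()
--         if not url:
--             continue
--         if any(token in url.lower() for token in _TOKENS):
--             return url
--         if fallback is None:
--             fallback = url
--     return fallback if fallback is not None else _NA
-- ===== Notes on version B (the rewrite author's own statement) =====
-- stated objective: simpler
-- what changed: Replaces A's two separate scans (preferred-URL scan, then a full fallback scan) by one pass that records the first non-empty URL as state and short-circuits on a preferred match.
import Mathlib
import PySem

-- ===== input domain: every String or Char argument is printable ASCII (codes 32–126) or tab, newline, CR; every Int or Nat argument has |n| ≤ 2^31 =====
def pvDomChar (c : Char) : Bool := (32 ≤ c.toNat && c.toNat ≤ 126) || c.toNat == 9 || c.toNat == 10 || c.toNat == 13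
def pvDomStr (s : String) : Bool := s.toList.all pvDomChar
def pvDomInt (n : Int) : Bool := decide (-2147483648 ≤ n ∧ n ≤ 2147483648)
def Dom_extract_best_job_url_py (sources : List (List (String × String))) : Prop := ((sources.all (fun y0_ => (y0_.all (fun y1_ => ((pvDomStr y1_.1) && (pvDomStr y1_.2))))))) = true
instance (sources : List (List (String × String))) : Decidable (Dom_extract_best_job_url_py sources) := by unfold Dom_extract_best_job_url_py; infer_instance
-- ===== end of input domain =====

-- B replaces A's two scans (preferred scan, then fallback scan) by a single pass
-- carrying the first non-empty URL as state; objective: simpler. Same return value.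

-- ===== PORT A =====
-- the token tuple of A
def pvTokens : List String :=
  ["workdayjobs.com", "/job/", "/jobs/", "greenhouse.io", "lever.co",
   "myworkdayjobs.com", "icims.com", "smartrecruiters.com"]

-- url = (s.get("url") or "").strip()   (values are String here, so `or ""` is getD "")
def pvGetUrl (s : List (String × String)) : String :=
  PySem.Str.strip ((PySem.Dict.get? (PySem.Dict.mk s) "url").getD "")

-- first loop of A: return the first non-empty URL whose lowercase contains a token
def pvScanPref : List (List (String × String)) → Option String
  | [] => none
  | s :: rest =>
    let url := pvGetUrl s
    if url = "" then pvScanPref rest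
    else if pvTokens.any (fun t => PySem.Str.isIn t (PySem.Str.lower url)) then some url
    else pvScanPref rest

-- second loop of A: return the first non-empty URL
def pvScanFirst : List (List (String × String)) → Option String
  | [] => none
  | s :: rest =>
    let url := pvGetUrl s
    if url = "" then pvScanFirst rest else some url

def extract_best_job_url_py (sources : List (List (String × String))) : String :=
  match pvScanPref sources with
  | some u => u
  | none =>
    match pvScanFirst sources with
    | some u => u
    | none => "NA"

-- ===== PORT B =====
-- single pass with the fallback (first non-empty URL seen so far) as loop state
def pvAltLoop : List (List (String × String)) → Option String → String
  | [], fb => fb.getD "NA"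
  | s :: rest, fb =>
    let url := PySem.Str.strip ((PySem.Dict.get? (PySem.Dict.mk s) "url").getD "")
    if url = "" then pvAltLoop rest fb
    else if pvTokens.any (fun t => PySem.Str.isIn t (PySem.Str.lower url)) then url
    else pvAltLoop rest (if fb.isNone then some url else fb)

def extract_best_job_url_py_alt (sources : List (List (String × String))) : String :=
  pvAltLoop sources none

-- ===== PRECONDITION & SPEC =====
def Spec_extract_best_job_url_py (sources : List (List (String × String))) (out : String) : Prop := out = extract_best_job_url_py_alt sources
instance (sources : List (List (String × String))) (out : String) : Decidable (Spec_extract_best_job_url_py sources out) := by unfold Spec_extract_best_job_url_py; infer_instance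

-- ===== CLAIM (what is proved, stated in full; the proofs are below) =====
def Claim_equal_extract_best_job_url_py : Prop := ∀ (sources : List (List (String × String))), Dom_extract_best_job_url_py sources → Spec_extract_best_job_url_py sources (extract_best_job_url_py sources)

-- ===== LEMMAS AND PROOFS =====

-- Invariant of B's loop: it equals A's preferred scan, then fb-or-first-URL, then "NA".
theorem pvAltLoop_eq (sources : List (List (String × String))) (fb : Option String) :
    pvAltLoop sources fb =
      match pvScanPref sources with
      | some u => u
      | none => (fb.or (pvScanFirst sources)).getD "NA" := by
  induction sources generalizing fb with
  | nil => cases fb <;> simp [pvAltLoop, pvScanPref, pvScanFirst]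
  | cons s rest ih =>
    simp only [pvAltLoop, pvScanPref, pvScanFirst, pvGetUrl]
    split_ifs with h1 h2 h3
    · exact ih fb
    · rfl
    · rw [ih]; cases hp : pvScanPref rest <;> simp_all
    · rw [ih]; cases fb <;> cases hp : pvScanPref rest <;> simp_all

theorem extract_best_job_url_py_spec : Claim_equal_extract_best_job_url_py := by
  intro sources _
  show extract_best_job_url_py sources = extract_best_job_url_py_alt sources
  rw [extract_best_job_url_py_alt, pvAltLoop_eq, extract_best_job_url_py]
  cases pvScanPref sources <;> [skip; rfl]
  cases pvScanFirst sources <;> rfl
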